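-- pv_equiv track=rewrite | github.com/xa-io/ffxiv-tools | AR Parser/AR Parser with Altoholic.py | get_part_column_name
-- ===== SOURCE A (Python) =====
-- SUB_PARTS_LOOKUP = {
--     21792: "Shark-class Bow",
--     21793: "Shark-class Bridge",
--     21794: "Shark-class Pressure Hull",
--     21795: "Shark-class Stern",
--     21796: "Unkiu-class Bow",
--     21797: "Unkiu-class Bridge",
--     21798: "Unkiu-class Pressure Hull",
--     21799: "Unkiu-class Stern",
--     22526: "Whale-class Bow",
--     22527: "Whale-class Bridge",
--     22528: "Whale-class Pressure Hull",
--     22529: "Whale-class Stern",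
--     23903: "Coelacanth-class Bow",
--     23904: "Coelacanth-class Bridge",
--     23905: "Coelacanth-class Pressure Hull",
--     23906: "Coelacanth-class Stern",
--     24344: "Syldra-class Bow",
--     24345: "Syldra-class Bridge",
--     24346: "Syldra-class Pressure Hull",
--     24347: "Syldra-class Stern",
--     24348: "Modified Shark-class Bow",
--     24349: "Modified Shark-class Bridge",
--     24350: "Modified Shark-class Pressure Hull",
--     24351: "Modified Shark-class Stern",
--     24352: "Modified Unkiu-class Bow",
--     24353: "Modified Unkiu-class Bridge",
--     24354: "Modified Unkiu-class Pressure Hull",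
--     24355: "Modified Unkiu-class Stern",
--     24356: "Modified Whale-class Bow",
--     24357: "Modified Whale-class Bridge",
--     24358: "Modified Whale-class Pressure Hull",
--     24359: "Modified Whale-class Stern",
--     24360: "Modified Coelacanth-class Bow",
--     24361: "Modified Coelacanth-class Bridge",
--     24362: "Modified Coelacanth-class Pressure Hull",
--     24363: "Modified Coelacanth-class Stern",
--     24364: "Modified Syldra-class Bow",
--     24365: "Modified Syldra-class Bridge",
--     24366: "Modified Syldra-class Pressure Hull",
--     24367: "Modified Syldra-class Stern"
-- }
--
-- CLASS_SHORTCUTS = {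
--     "Shark-class": "S",
--     "Unkiu-class": "U",
--     "Whale-class": "W",
--     "Coelacanth-class": "C",
--     "Syldra-class": "Y",
--     "Modified Shark-class": "S+",
--     "Modified Unkiu-class": "U+",
--     "Modified Whale-class": "W+",
--     "Modified Coelacanth-class": "C+",
--     "Modified Syldra-class": "Y+"
-- }
--
-- PART_TYPE_ABBREV = {
--     "Bow": "BOW",
--     "Bridge": "BRG",
--     "Pressure Hull": "PH",
--     "Stern": "STN"
-- }
--
-- def get_part_column_name(item_id):
--     """Get the column name for a submarine part item ID."""
--     if item_id not in SUB_PARTS_LOOKUP: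
--         return None
--
--     full_name = SUB_PARTS_LOOKUP[item_id]
--
--     # Find class
--     class_code = None
--     for class_name, code in CLASS_SHORTCUTS.items():
--         if full_name.startswith(class_name):
--             class_code = code
--             break
--
--     if not class_code:
--         return None
--
--     # Find part type
--     part_code = None
--     for part_name, abbrev in PART_TYPE_ABBREV.items():
--         if part_name in full_name:
--             part_code = abbrev
--             break
--
--     if not part_code:
--         return None
--
--     return f"{class_code} {part_code}"
-- ===== SOURCE B (Python) =====
-- # Item IDs come in contiguous blocks of 4 (Bow, Bridge, Pressure Hull, Stern),
-- # so the column name can be decoded arithmetically: find the class block by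
-- # range, then pick the part abbreviation by the offset inside the block.
--
-- PART_CODES = ["BOW", "BRG", "PH", "STN"]
--
-- CLASS_RANGES = [
--     (21792, "S"), (21796, "U"),
--     (22526, "W"),
--     (23903, "C"),
--     (24344, "Y"),
--     (24348, "S+"), (24352, "U+"), (24356, "W+"),
--     (24360, "C+"), (24364, "Y+"),
-- ]
--
--
-- def get_part_column_name(item_id):
--     """Get the column name for a submarine part item ID."""
--     for base, class_code in CLASS_RANGES:
--         if base <= item_id < base + 4:
--             return f"{class_code} {PART_CODES[item_id - base]}"
--     return None
-- ===== Notes on version B (the rewrite author's own statement) =====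
-- stated objective: alternative
-- what changed: B drops all three dictionaries and all string matching: item IDs come in contiguous blocks of four, so it finds the class by an arithmetic range test over ten (base, class) pairs and picks the part abbreviation by the offset item_id - base into a four-element list.
import Mathlib
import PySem

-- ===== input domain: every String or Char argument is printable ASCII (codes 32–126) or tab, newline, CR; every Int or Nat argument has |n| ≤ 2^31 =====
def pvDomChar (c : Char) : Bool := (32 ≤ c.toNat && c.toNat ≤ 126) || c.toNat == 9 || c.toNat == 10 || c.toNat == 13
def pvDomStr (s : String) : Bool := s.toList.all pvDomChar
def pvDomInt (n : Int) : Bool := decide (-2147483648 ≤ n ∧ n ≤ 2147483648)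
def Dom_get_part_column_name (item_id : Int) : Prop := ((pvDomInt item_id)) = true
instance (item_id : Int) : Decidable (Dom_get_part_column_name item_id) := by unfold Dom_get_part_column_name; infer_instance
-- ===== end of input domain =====

-- B replaces A's dictionaries and string matching by arithmetic decoding of the
-- contiguous id blocks (range test for the class, offset into a 4-list for the part).

-- ===== PORT A =====
def SUB_PARTS_LOOKUP : PySem.Dict Int String := PySem.Dict.ofList [
  (21792, "Shark-class Bow"), (21793, "Shark-class Bridge"),
  (21794, "Shark-class Pressure Hull"), (21795, "Shark-class Stern"),
  (21796, "Unkiu-class Bow"), (21797, "Unkiu-class Bridge"),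
  (21798, "Unkiu-class Pressure Hull"), (21799, "Unkiu-class Stern"),
  (22526, "Whale-class Bow"), (22527, "Whale-class Bridge"),
  (22528, "Whale-class Pressure Hull"), (22529, "Whale-class Stern"),
  (23903, "Coelacanth-class Bow"), (23904, "Coelacanth-class Bridge"),
  (23905, "Coelacanth-class Pressure Hull"), (23906, "Coelacanth-class Stern"),
  (24344, "Syldra-class Bow"), (24345, "Syldra-class Bridge"),
  (24346, "Syldra-class Pressure Hull"), (24347, "Syldra-class Stern"),
  (24348, "Modified Shark-class Bow"), (24349, "Modified Shark-class Bridge"),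
  (24350, "Modified Shark-class Pressure Hull"), (24351, "Modified Shark-class Stern"),
  (24352, "Modified Unkiu-class Bow"), (24353, "Modified Unkiu-class Bridge"),
  (24354, "Modified Unkiu-class Pressure Hull"), (24355, "Modified Unkiu-class Stern"),
  (24356, "Modified Whale-class Bow"), (24357, "Modified Whale-class Bridge"),
  (24358, "Modified Whale-class Pressure Hull"), (24359, "Modified Whale-class Stern"),
  (24360, "Modified Coelacanth-class Bow"), (24361, "Modified Coelacanth-class Bridge"),
  (24362, "Modified Coelacanth-class Pressure Hull"), (24363, "Modified Coelacanth-class Stern"),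
  (24364, "Modified Syldra-class Bow"), (24365, "Modified Syldra-class Bridge"),
  (24366, "Modified Syldra-class Pressure Hull"), (24367, "Modified Syldra-class Stern")]

def CLASS_SHORTCUTS : PySem.Dict String String := PySem.Dict.ofList [
  ("Shark-class", "S"), ("Unkiu-class", "U"), ("Whale-class", "W"),
  ("Coelacanth-class", "C"), ("Syldra-class", "Y"),
  ("Modified Shark-class", "S+"), ("Modified Unkiu-class", "U+"),
  ("Modified Whale-class", "W+"), ("Modified Coelacanth-class", "C+"),
  ("Modified Syldra-class", "Y+")]

def PART_TYPE_ABBREV : PySem.Dict String String := PySem.Dict.ofList [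
  ("Bow", "BOW"), ("Bridge", "BRG"), ("Pressure Hull", "PH"), ("Stern", "STN")]

-- 'for … if …: x = …; break' = first match over the items list
def get_part_column_name (item_id : Int) : Option String :=
  if SUB_PARTS_LOOKUP.contains item_id = false then none
  else
    match SUB_PARTS_LOOKUP.get? item_id with
    | none => none
    | some full_name =>
      let class_code : Option String :=
        (CLASS_SHORTCUTS.items.find? (fun p => PySem.Str.startswith full_name p.1)).map (·.2)
      match class_code with
      | none => none
      | some cc =>
        let part_code : Option String :=
          (PART_TYPE_ABBREV.items.find? (fun p => PySem.Str.isIn p.1 full_name)).map (·.2)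
        match part_code with
        | none => none
        | some pc => some (cc ++ " " ++ pc)

-- ===== PORT B =====
def PART_CODES : List String := ["BOW", "BRG", "PH", "STN"]

def CLASS_RANGES : List (Int × String) := [
  (21792, "S"), (21796, "U"), (22526, "W"), (23903, "C"), (24344, "Y"),
  (24348, "S+"), (24352, "U+"), (24356, "W+"), (24360, "C+"), (24364, "Y+")]

-- the for-loop is a first-match over CLASS_RANGES; PART_CODES[item_id - base] is pyGet?
-- (the index is always 0..3 when the range test holds, so pyGet? is some there)
def get_part_column_name_alt (item_id : Int) : Option String :=
  match CLASS_RANGES.find? (fun p => decide (p.1 ≤ item_id ∧ item_id < p.1 + 4)) with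
  | none => none
  | some (base, class_code) =>
    (PySem.List.pyGet? PART_CODES (item_id - base)).map (fun pc => class_code ++ " " ++ pc)

-- ===== PRECONDITION & SPEC =====
def Spec_get_part_column_name (item_id : Int) (out : Option String) : Prop := out = get_part_column_name_alt item_id
instance (item_id : Int) (out : Option String) : Decidable (Spec_get_part_column_name item_id out) := by unfold Spec_get_part_column_name; infer_instance

-- ===== CLAIM (what is proved, stated in full; the proofs are below) =====
def Claim_equal_get_part_column_name : Prop := ∀ (item_id : Int), Dom_get_part_column_name item_id → Spec_get_part_column_name item_id (get_part_column_name item_id)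

-- ===== LEMMAS AND PROOFS =====
set_option maxRecDepth 10000 in
theorem keysA_eq : SUB_PARTS_LOOKUP.keys = [21792,21793,21794,21795,21796,21797,21798,21799,22526,22527,22528,22529,23903,23904,23905,23906,24344,24345,24346,24347,24348,24349,24350,24351,24352,24353,24354,24355,24356,24357,24358,24359,24360,24361,24362,24363,24364,24365,24366,24367] := by decide

set_option maxRecDepth 100000 in
theorem equal_all (item_id : Int) :
    get_part_column_name item_id = get_part_column_name_alt item_id := by
  by_cases h : SUB_PARTS_LOOKUP.contains item_id = true
  · rw [PySem.Dict.contains_iff_mem_keys, keysA_eq] at h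
    simp only [List.mem_cons, List.not_mem_nil, or_false] at h
    rcases h with rfl|rfl|rfl|rfl|rfl|rfl|rfl|rfl|rfl|rfl|rfl|rfl|rfl|rfl|rfl|rfl|rfl|rfl|rfl|rfl|rfl|rfl|rfl|rfl|rfl|rfl|rfl|rfl|rfl|rfl|rfl|rfl|rfl|rfl|rfl|rfl|rfl|rfl|rfl|rfl
    all_goals decide
  · rw [Bool.not_eq_true] at h
    have h' : item_id ∉ SUB_PARTS_LOOKUP.keys := by
      intro hm
      rw [← PySem.Dict.contains_iff_mem_keys, h] at hm
      exact Bool.false_ne_true hm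
    rw [keysA_eq] at h'
    simp only [List.mem_cons, List.not_mem_nil, or_false, not_or] at h'
    have hf : CLASS_RANGES.find? (fun p => decide (p.1 ≤ item_id ∧ item_id < p.1 + 4)) = none := by
      rw [List.find?_eq_none]
      intro p hp
      simp only [CLASS_RANGES, List.mem_cons, List.not_mem_nil, or_false] at hp
      rcases hp with rfl|rfl|rfl|rfl|rfl|rfl|rfl|rfl|rfl|rfl <;>
        · simp only [decide_eq_true_eq]
          omega
    rw [get_part_column_name, h, get_part_column_name_alt, hf]
    simp

-- ===== VERDICT (by name: the statement is the Claim_ definition above) =====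
theorem get_part_column_name_spec : Claim_equal_get_part_column_name := by
  intro id _
  exact equal_all id
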